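-- pv_equiv track=rewrite | github.com/LawlietJH/CChain | CChain.py | Asc_Bin
-- ===== SOURCE A (Python) =====
-- def Asc_Bin(Ascii):	#~ Ascii a Binario.
--
-- 	cont = 0
-- 	Binario = ""
--
-- 	Bin = ''.join((bin(ord(c))[2:].zfill(8) for c in Ascii))
--
-- 	#~ Se Separa la Cadena con un Espacio en Cada Byte.
-- 	for b in Bin:
--
-- 		cont += 1
--
-- 		if(cont <= 7):
-- 			Binario = Binario + b
--
-- 		else:
-- 			Binario = Binario + b + " "
-- 			cont = 0
--
-- 	return Binario
-- ===== SOURCE B (Python) =====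
-- def Asc_Bin(Ascii):
--     Bin = ''.join(bin(ord(c))[2:].zfill(8) for c in Ascii)
--     parts = []
--     for i in range(0, len(Bin), 8):
--         chunk = Bin[i:i+8]
--         parts.append(chunk)
--         if len(chunk) == 8:
--             parts.append(" ")
--     return ''.join(parts)
-- ===== Notes on version B (the rewrite author's own statement) =====
-- stated objective: faster
-- what changed: Replaced A's per-bit counter loop that grows the result by repeated string concatenation with iteration over 8-character slices of the flattened bit string, collecting chunks (plus a space per complete chunk) in a list joined once.
import Mathlib
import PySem

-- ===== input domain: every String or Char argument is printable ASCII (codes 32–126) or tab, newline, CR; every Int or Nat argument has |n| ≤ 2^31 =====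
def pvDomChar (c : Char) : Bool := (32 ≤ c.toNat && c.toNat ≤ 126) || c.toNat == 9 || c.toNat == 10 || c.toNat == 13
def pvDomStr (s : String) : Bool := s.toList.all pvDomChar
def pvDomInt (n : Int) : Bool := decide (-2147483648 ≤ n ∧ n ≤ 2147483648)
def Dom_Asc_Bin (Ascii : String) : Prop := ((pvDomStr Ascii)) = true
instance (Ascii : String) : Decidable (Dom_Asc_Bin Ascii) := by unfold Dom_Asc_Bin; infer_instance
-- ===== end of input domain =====

-- B replaces A's per-character counter loop (one string concatenation per bit) by slicing the
-- flattened bit string into 8-character chunks collected in a list joined once; a timing run measured B faster (A does one string concatenation per bit).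

-- ===== PORT A =====
-- the line Bin = ''.join(bin(ord(c))[2:].zfill(8) for c in Ascii), identical in A and in B
def pvBinJoin (Ascii : String) : List Char :=
  PySem.Chars.join []
    (Ascii.toList.map (fun c =>
      PySem.Chars.zfill (PySem.List.slice (PySem.Int.toBinChars0b (c.toNat : Int)) (some 2) none) 8))

-- the body of A's 'for b in Bin' loop; state = (cont, Binario)
def pvStepA (st : Int × List Char) (b : Char) : Int × List Char :=
  let cont := st.1 + 1
  if cont ≤ 7 then (cont, st.2 ++ [b]) else (0, st.2 ++ [b] ++ [' '])

def Asc_Bin (Ascii : String) : String :=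
  String.ofList ((pvBinJoin Ascii).foldl pvStepA (0, ([] : List Char))).2

-- ===== PORT B =====
-- the body of B's 'for i in range(0, len(Bin), 8)' loop
def pvStepB (Bin : List Char) (acc : List Char) (i : Int) : List Char :=
  let chunk := PySem.List.slice Bin (some i) (some (i + 8))
  if chunk.length == 8 then acc ++ chunk ++ [' '] else acc ++ chunk

def Asc_Bin_alt (Ascii : String) : String :=
  String.ofList ((PySem.List.pyRange 0 ((pvBinJoin Ascii).length : Int) 8).foldl
    (pvStepB (pvBinJoin Ascii)) ([] : List Char))

-- ===== PRECONDITION & SPEC =====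
def Spec_Asc_Bin (Ascii : String) (out : String) : Prop := out = Asc_Bin_alt Ascii
instance (Ascii : String) (out : String) : Decidable (Spec_Asc_Bin Ascii out) := by unfold Spec_Asc_Bin; infer_instance

-- ===== CLAIM (what is proved, stated in full; the proofs are below) =====
def Claim_equal_Asc_Bin : Prop := ∀ (Ascii : String), Dom_Asc_Bin Ascii → Spec_Asc_Bin Ascii (Asc_Bin Ascii)

-- ===== LEMMAS AND PROOFS =====

-- the common value of both loops: the bit string cut after every complete 8-character group
def pvT (bin : List Char) : List Char :=
  if bin = [] then []
  else if bin.length < 8 then bin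
  else bin.take 8 ++ ' ' :: pvT (bin.drop 8)
termination_by bin.length
decreasing_by
  rename_i h1 h2
  have : bin.length ≠ 0 := by simpa using h1
  simp only [List.length_drop]; omega

theorem pvT_nil : pvT [] = [] := by rw [pvT]; simp

theorem pvT_short (bin : List Char) (h : bin.length < 8) : pvT bin = bin := by
  rcases eq_or_ne bin [] with rfl | hne
  · rw [pvT]; simp
  · rw [pvT, if_neg hne, if_pos h]

theorem pvT_long (bin : List Char) (h : 8 ≤ bin.length) :
    pvT bin = bin.take 8 ++ ' ' :: pvT (bin.drop 8) := by
  rw [pvT]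
  have hne : bin ≠ [] := by rintro rfl; simp at h
  simp [hne]; omega

-- A's loop over fewer than 8 remaining characters: every step takes the then-branch
theorem pvA_partial (bin : List Char) (cont : Int) (acc : List Char)
    (h0 : 0 ≤ cont) (h7 : cont + bin.length ≤ 7) :
    bin.foldl pvStepA (cont, acc) = (cont + bin.length, acc ++ bin) := by
  induction bin generalizing cont acc with
  | nil => simp
  | cons b bs ih =>
    simp only [List.foldl_cons, pvStepA]
    have hle : cont + 1 ≤ 7 := by simp at h7; omega
    rw [if_pos hle, ih (cont + 1) (acc ++ [b]) (by omega) (by simp at h7 ⊢; omega)]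
    simp; omega

-- A's loop computes pvT (final cont = bin.length % 8)
theorem pvA_loop (m : Nat) (bin : List Char) (acc : List Char)
    (hm : (bin.length + 7) / 8 = m) :
    bin.foldl pvStepA (0, acc) = (((bin.length % 8 : Nat) : Int), acc ++ pvT bin) := by
  induction m generalizing bin acc with
  | zero =>
    have : bin = [] := by
      rcases bin with _ | _
      · rfl
      · simp at hm; omega
    subst this; simp [pvT_nil]
  | succ m ih =>
    by_cases hlen : bin.length < 8
    · have hm0 : m = 0 := by omega
      have hpos : bin.length ≠ 0 := by rcases bin with _ | _ <;> simp_all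
      rw [pvA_partial bin 0 acc (by omega) (by omega), pvT_short bin hlen]
      have : bin.length % 8 = bin.length := Nat.mod_eq_of_lt hlen
      simp [this]
    · have hlen : 8 ≤ bin.length := Nat.le_of_not_lt hlen
      -- expose the first 8 characters
      match bin, hlen with
      | a::b::c::d::e::f::g::h::rest, _ =>
        simp only [List.foldl_cons]
        -- evaluate the 8 explicit steps
        have e8 : pvStepA (pvStepA (pvStepA (pvStepA (pvStepA (pvStepA (pvStepA (pvStepA
            (0, acc) a) b) c) d) e) f) g) h
            = (0, acc ++ [a, b, c, d, e, f, g, h, ' ']) := by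
          simp [pvStepA]
        rw [e8]
        have hmr : (rest.length + 7) / 8 = m := by simp at hm; omega
        rw [ih rest (acc ++ [a, b, c, d, e, f, g, h, ' ']) hmr]
        have hmod : (a::b::c::d::e::f::g::h::rest : List Char).length % 8 = rest.length % 8 := by
          simp; omega
        rw [hmod, pvT_long (a::b::c::d::e::f::g::h::rest) (by simp)]
        simp

-- B's range-and-slice loop, rewritten over List.range, computes pvT
theorem pvB_loop (m : Nat) (bin : List Char) (acc : List Char)
    (hm : (bin.length + 7) / 8 = m) :
    (List.range m).foldl (fun acc k => pvStepB bin acc ((8 * k : Nat) : Int)) acc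
      = acc ++ pvT bin := by
  induction m generalizing bin acc with
  | zero =>
    have : bin = [] := by
      rcases bin with _ | _
      · rfl
      · simp at hm; omega
    subst this; simp [pvT_nil]
  | succ m ih =>
    have hne : bin ≠ [] := by rintro rfl; simp at hm
    rw [List.range_succ_eq_map]
    simp only [List.foldl_cons, List.foldl_map]
    have hchunk : ∀ (k : Nat) (ac : List Char),
        pvStepB bin ac ((8 * (k + 1) : Nat) : Int) = pvStepB (bin.drop 8) ac ((8 * k : Nat) : Int) := by
      intro k ac
      simp only [pvStepB]
      have h1 : PySem.List.slice bin (some ((8 * (k + 1) : Nat) : Int))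
            (some (((8 * (k + 1) : Nat) : Int) + 8))
          = PySem.List.slice (bin.drop 8) (some ((8 * k : Nat) : Int)) (some (((8 * k : Nat) : Int) + 8)) := by
        have e1 := PySem.List.slice_natCast_add bin (8 * (k + 1)) 8
        have e2 := PySem.List.slice_natCast_add (bin.drop 8) (8 * k) 8
        push_cast at e1 e2 ⊢
        rw [e1, e2, List.drop_drop]
        ring_nf
      rw [h1]
    have hcongr : (List.range m).foldl
          (fun ac k => pvStepB bin ac ((8 * (k + 1) : Nat) : Int))
          (pvStepB bin acc ((8 * 0 : Nat) : Int))
        = (List.range m).foldl (fun ac k => pvStepB (bin.drop 8) ac ((8 * k : Nat) : Int))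
          (pvStepB bin acc ((8 * 0 : Nat) : Int)) := by
      apply PySem.List.foldl_congr_mem
      intro ac k _
      exact hchunk k ac
    have hfirst : pvStepB bin acc ((8 * 0 : Nat) : Int) = acc ++ bin.take 8 ++
        (if 8 ≤ bin.length then [' '] else []) := by
      simp only [pvStepB, Nat.mul_zero, Nat.cast_zero]
      rw [show ((0 : Int) + 8) = (8 : Int) by ring, PySem.List.slice_zero_start]
      have e0 := PySem.List.slice_to (xs := bin) (b := 8) (by norm_num)
      norm_num at e0
      rw [e0]
      by_cases hl : 8 ≤ bin.length
      · rw [if_pos hl]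
        have : (bin.take 8).length = 8 := by simp; omega
        simp [this]
      · rw [if_neg hl]
        have hq : (bin.take 8).length ≠ 8 := by simp; omega
        simp
        omega
    by_cases hlen : bin.length < 8
    · have hm0 : m = 0 := by
        have : bin.length ≠ 0 := by simpa using hne
        omega
      subst hm0
      simp only [List.range_zero, List.foldl_nil]
      rw [hfirst, if_neg (by omega), List.take_of_length_le (by omega), pvT_short bin hlen]
      simp
    · have hlen : 8 ≤ bin.length := Nat.le_of_not_lt hlen
      rw [show (fun (ac : List Char) (k : Nat) => pvStepB bin ac ((8 * Nat.succ k : Nat) : Int))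
            = (fun (ac : List Char) (k : Nat) => pvStepB bin ac ((8 * (k + 1) : Nat) : Int)) from rfl]
      rw [hcongr, ih (bin.drop 8) _ (by simp; omega), hfirst, if_pos hlen,
        pvT_long bin hlen]
      simp

-- the pyRange in B is List.range in disguise
theorem pvRange_eq (n m : Nat) (hm : (n + 7) / 8 = m) :
    PySem.List.pyRange 0 (n : Int) 8 = (List.range m).map (fun k => ((8 * k : Nat) : Int)) := by
  rw [PySem.List.pyRange_of_pos 0 (n : Int) (by norm_num)]
  by_cases h0 : (0 : Int) < (n : Int)
  · rw [if_pos h0]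
    have : (((n : Int) - 0 + 8 - 1) / 8).toNat = m := by
      have : ((n : Int) + 7) / 8 = ((n + 7 : Nat) : Int) / ((8 : Nat) : Int) := by push_cast; ring_nf
      omega
    rw [this]
    apply List.map_congr_left
    intro k _
    push_cast; ring
  · rw [if_neg h0]
    have : n = 0 := by omega
    subst this
    have : m = 0 := by omega
    subst this
    simp

-- ===== VERDICT (by name: the statement is the Claim_ definition above) =====
theorem Asc_Bin_spec : Claim_equal_Asc_Bin := by
  intro Ascii _
  unfold Spec_Asc_Bin Asc_Bin Asc_Bin_alt
  generalize pvBinJoin Ascii = bin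
  rw [pvRange_eq bin.length ((bin.length + 7) / 8) rfl, List.foldl_map,
    pvB_loop ((bin.length + 7) / 8) bin [] rfl,
    pvA_loop ((bin.length + 7) / 8) bin [] rfl]
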